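-- pv_equiv track=rewrite | github.com/e-likoudi/scripts_v2 | new_protocol_tools/organize_similar.py | organize_by_priority
-- ===== SOURCE A (Python) =====
-- def organize_by_priority(summaries):
--     """Organizes summaries by protocol phase priority (early → mid → late)"""
--     phase_priority = ["early", "mid", "late"]
--
--     # Create base structure
--     organized = {
--         phase: {
--             "low": [],
--             "medium": [],
--             "high": []
--         } for phase in phase_priority
--     }
--
--     # Populate the structure
--     for summary in summaries:
--         phase = summary.get("phase", "unclassified")
--         detail = summary.get("detail_level", "unclassified")
--
--         if phase in phase_priority and detail in ["low", "medium", "high"]: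
--             organized[phase][detail].append(summary)
--
--     return organized
-- ===== SOURCE B (Python) =====
-- def organize_by_priority(summaries):
--     """Organizes summaries by protocol phase priority (early -> mid -> late)"""
--     return {
--         phase: {
--             detail: [s for s in summaries
--                      if s.get("phase") == phase and s.get("detail_level") == detail]
--             for detail in ["low", "medium", "high"]
--         }
--         for phase in ["early", "mid", "late"]
--     }
-- ===== Notes on version B (the rewrite author's own statement) =====
-- stated objective: idiomatic
-- what changed: Replaces the single-pass bucketing loop (build empty nested dict, then dispatch each summary into organized[phase][detail]) by nested dict comprehensions that build each of the nine cells directly by filtering the summaries list once per cell.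
import Mathlib
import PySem

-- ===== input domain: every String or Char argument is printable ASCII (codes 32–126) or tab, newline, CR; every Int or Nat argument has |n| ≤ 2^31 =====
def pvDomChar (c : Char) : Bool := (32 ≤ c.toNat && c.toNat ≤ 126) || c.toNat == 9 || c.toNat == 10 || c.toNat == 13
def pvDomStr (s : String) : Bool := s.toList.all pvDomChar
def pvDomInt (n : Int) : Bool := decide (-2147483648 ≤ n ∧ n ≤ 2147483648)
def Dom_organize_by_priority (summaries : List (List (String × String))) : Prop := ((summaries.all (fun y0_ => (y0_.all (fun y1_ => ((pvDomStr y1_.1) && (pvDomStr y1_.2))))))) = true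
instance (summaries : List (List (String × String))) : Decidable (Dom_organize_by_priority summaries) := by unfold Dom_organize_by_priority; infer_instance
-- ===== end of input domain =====

-- B builds the nine (phase, detail) cells directly by per-cell filtering (nested comprehensions) instead of A's single-pass dispatch into a pre-built nested dict; same values, idiomatic restructuring.

-- ===== PORT A =====
def pvPhases : List String := ["early", "mid", "late"]
def pvDetails : List String := ["low", "medium", "high"]

-- organized[phase][detail].append(summary): first-match in-place update on the nested
-- association lists (exact: the outer/inner keys are the three distinct literals).
def pvStepA (org : List (String × List (String × List (List (String × String)))))
    (s : List (String × String)) : List (String × List (String × List (List (String × String)))) :=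
  let phase := PySem.Dict.getD (PySem.Dict.mk s) "phase" "unclassified"
  let detail := PySem.Dict.getD (PySem.Dict.mk s) "detail_level" "unclassified"
  if phase ∈ pvPhases ∧ detail ∈ pvDetails then
    org.map (fun pe =>
      if pe.1 == phase then
        (pe.1, pe.2.map (fun de => if de.1 == detail then (de.1, de.2 ++ [s]) else de))
      else pe)
  else org

def organize_by_priority (summaries : List (List (String × String))) :
    List (String × List (String × List (List (String × String)))) :=
  summaries.foldl pvStepA (pvPhases.map (fun p => (p, pvDetails.map (fun d => (d, [])))))

-- ===== PORT B =====
-- one cell: [s for s in summaries if s.get("phase") == phase and s.get("detail_level") == detail]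
def pvCell (summaries : List (List (String × String))) (p d : String) : List (List (String × String)) :=
  summaries.filter (fun s =>
    PySem.Dict.get? (PySem.Dict.mk s) "phase" == some p &&
    PySem.Dict.get? (PySem.Dict.mk s) "detail_level" == some d)

def organize_by_priority_alt (summaries : List (List (String × String))) :
    List (String × List (String × List (List (String × String)))) :=
  ["early", "mid", "late"].map (fun phase =>
    (phase, ["low", "medium", "high"].map (fun detail =>
      (detail, pvCell summaries phase detail))))

-- ===== PRECONDITION & SPEC =====
def Spec_organize_by_priority (summaries : List (List (String × String))) (out : List (String × List (String × List (List (String × String))))) : Prop := out = organize_by_priority_alt summaries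
instance (summaries : List (List (String × String))) (out : List (String × List (String × List (List (String × String))))) : Decidable (Spec_organize_by_priority summaries out) := by
  unfold Spec_organize_by_priority
  -- instance search needs a hand with the deeply nested type
  have d0 : DecidableEq (List (String × String)) := inferInstance
  have d1 : DecidableEq (List (List (String × String))) := inferInstance
  have d2 : DecidableEq (String × List (List (String × String))) := inferInstance
  have d3 : DecidableEq (List (String × List (List (String × String)))) := inferInstance
  have d4 : DecidableEq (String × List (String × List (List (String × String)))) := inferInstance
  infer_instance

-- ===== CLAIM (what is proved, stated in full; the proofs are below) =====
def Claim_equal_organize_by_priority : Prop := ∀ (summaries : List (List (String × String))), Dom_organize_by_priority summaries → Spec_organize_by_priority summaries (organize_by_priority summaries)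

-- ===== LEMMAS AND PROOFS =====

-- B's test `s.get(k) == p` agrees with a test on A's `s.get(k, "unclassified")` whenever p ≠ "unclassified"
lemma pv_bridge (s : List (String × String)) (k p dflt : String) (h : p ≠ dflt) :
    (PySem.Dict.get? (PySem.Dict.mk s) k == some p)
      = (PySem.Dict.getD (PySem.Dict.mk s) k dflt == p) := by
  rw [PySem.Dict.getD_eq_get?_getD]
  cases PySem.Dict.get? (PySem.Dict.mk s) k with
  | none => simp [Ne.symm h]
  | some v => simp

lemma pv_cell_cons (s : List (String × String)) (ss : List (List (String × String)))
    (p d : String) (hp : p ≠ "unclassified") (hd : d ≠ "unclassified") :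
    pvCell (s :: ss) p d =
      (if (PySem.Dict.getD (PySem.Dict.mk s) "phase" "unclassified" == p &&
           PySem.Dict.getD (PySem.Dict.mk s) "detail_level" "unclassified" == d)
       then s :: pvCell ss p d else pvCell ss p d) := by
  simp only [pvCell, List.filter_cons,
    pv_bridge s "phase" p "unclassified" hp,
    pv_bridge s "detail_level" d "unclassified" hd]

-- one step of A's loop on the literal nested structure, cellwise
lemma pv_step (s : List (String × String))
    (a b c d e f g h i : List (List (String × String))) :
    pvStepA
      [("early", [("low", a), ("medium", b), ("high", c)]),
       ("mid", [("low", d), ("medium", e), ("high", f)]),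
       ("late", [("low", g), ("medium", h), ("high", i)])] s =
      (let ph := PySem.Dict.getD (PySem.Dict.mk s) "phase" "unclassified"
       let dl := PySem.Dict.getD (PySem.Dict.mk s) "detail_level" "unclassified"
       [("early", [("low", a ++ (if (ph == "early" && dl == "low") then [s] else [])),
                   ("medium", b ++ (if (ph == "early" && dl == "medium") then [s] else [])),
                   ("high", c ++ (if (ph == "early" && dl == "high") then [s] else []))]),
        ("mid", [("low", d ++ (if (ph == "mid" && dl == "low") then [s] else [])),
                 ("medium", e ++ (if (ph == "mid" && dl == "medium") then [s] else [])),
                 ("high", f ++ (if (ph == "mid" && dl == "high") then [s] else []))]),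
        ("late", [("low", g ++ (if (ph == "late" && dl == "low") then [s] else [])),
                  ("medium", h ++ (if (ph == "late" && dl == "medium") then [s] else [])),
                  ("high", i ++ (if (ph == "late" && dl == "high") then [s] else []))])]) := by
  unfold pvStepA
  set ph := PySem.Dict.getD (PySem.Dict.mk s) "phase" "unclassified" with hph
  set dl := PySem.Dict.getD (PySem.Dict.mk s) "detail_level" "unclassified" with hdl
  by_cases hmem : ph ∈ pvPhases ∧ dl ∈ pvDetails
  · obtain ⟨hp, hd⟩ := hmem
    have hp' := hp; have hd' := hd
    simp only [pvPhases, List.mem_cons, List.not_mem_nil, or_false] at hp'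
    simp only [pvDetails, List.mem_cons, List.not_mem_nil, or_false] at hd'
    rw [if_pos ⟨hp, hd⟩]
    rcases hp' with h1 | h1 | h1 <;> rcases hd' with h2 | h2 | h2 <;> simp [h1, h2]
  · rw [if_neg hmem]
    rcases not_and_or.mp hmem with hn | hn
    · simp only [pvPhases, List.mem_cons, List.not_mem_nil, or_false, not_or] at hn
      obtain ⟨h1, h2, h3⟩ := hn
      simp [h1, h2, h3]
    · simp only [pvDetails, List.mem_cons, List.not_mem_nil, or_false, not_or] at hn
      obtain ⟨h1, h2, h3⟩ := hn
      simp [h1, h2, h3]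

lemma pv_app_if {α : Type} (a X : List α) (s : α) (c : Bool) :
    (a ++ (if c then [s] else [])) ++ X = a ++ (if c then s :: X else X) := by
  cases c <;> simp

lemma pv_main (ss : List (List (String × String)))
    (a b c d e f g h i : List (List (String × String))) :
    ss.foldl pvStepA
      [("early", [("low", a), ("medium", b), ("high", c)]),
       ("mid", [("low", d), ("medium", e), ("high", f)]),
       ("late", [("low", g), ("medium", h), ("high", i)])] =
      [("early", [("low", a ++ pvCell ss "early" "low"), ("medium", b ++ pvCell ss "early" "medium"), ("high", c ++ pvCell ss "early" "high")]),
       ("mid", [("low", d ++ pvCell ss "mid" "low"), ("medium", e ++ pvCell ss "mid" "medium"), ("high", f ++ pvCell ss "mid" "high")]),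
       ("late", [("low", g ++ pvCell ss "late" "low"), ("medium", h ++ pvCell ss "late" "medium"), ("high", i ++ pvCell ss "late" "high")])] := by
  induction ss generalizing a b c d e f g h i with
  | nil => simp [pvCell]
  | cons s ss ih =>
    rw [List.foldl_cons, pv_step, ih,
      pv_cell_cons s ss "early" "low" (by decide) (by decide),
      pv_cell_cons s ss "early" "medium" (by decide) (by decide),
      pv_cell_cons s ss "early" "high" (by decide) (by decide),
      pv_cell_cons s ss "mid" "low" (by decide) (by decide),
      pv_cell_cons s ss "mid" "medium" (by decide) (by decide),
      pv_cell_cons s ss "mid" "high" (by decide) (by decide),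
      pv_cell_cons s ss "late" "low" (by decide) (by decide),
      pv_cell_cons s ss "late" "medium" (by decide) (by decide),
      pv_cell_cons s ss "late" "high" (by decide) (by decide)]
    simp only [pv_app_if]

-- ===== VERDICT (by name: the statement is the Claim_ definition above) =====
theorem organize_by_priority_spec : Claim_equal_organize_by_priority := by
  intro summaries _
  unfold Spec_organize_by_priority organize_by_priority organize_by_priority_alt
  simp only [pvPhases, pvDetails, List.map_cons, List.map_nil]
  rw [pv_main]
  simp
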